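-- pv_equiv track=rewrite | github.com/LelinskiM/prg-basics | 04-Functions/7-19-SumOfRepet.py | f
-- ===== SOURCE A (Python) =====
-- def f(n):
--
--     dig = str(n)
--     total = 0
--
--     for i in "1234567890":
--         count = 0
--         for j in dig:
--             if i == j:
--                 count += 1
--         if count > 1:
--             total += (int(i) * count)
--     return total
-- ===== SOURCE B (Python) =====
-- def _scan(s):
--     # s is sorted, so equal characters form contiguous runs; sum digit*runlength over the repeated runs
--     if not s:
--         return 0
--     a = s[0]
--     k = 1
--     while k < len(s) and s[k] == a:
--         k += 1
--     add = int(a) * k if k > 1 and a.isdigit() else 0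
--     return add + _scan(s[k:])
--
-- def f(n):
--     return _scan(sorted(str(n)))
-- ===== Notes on version B (the rewrite author's own statement) =====
-- stated objective: alternative
-- what changed: B sorts the characters of str(n) and recursively scans the sorted list run by run, adding int(d)*runlength for each repeated digit run, instead of A's ten separate counting rescans of str(n).
import Mathlib
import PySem

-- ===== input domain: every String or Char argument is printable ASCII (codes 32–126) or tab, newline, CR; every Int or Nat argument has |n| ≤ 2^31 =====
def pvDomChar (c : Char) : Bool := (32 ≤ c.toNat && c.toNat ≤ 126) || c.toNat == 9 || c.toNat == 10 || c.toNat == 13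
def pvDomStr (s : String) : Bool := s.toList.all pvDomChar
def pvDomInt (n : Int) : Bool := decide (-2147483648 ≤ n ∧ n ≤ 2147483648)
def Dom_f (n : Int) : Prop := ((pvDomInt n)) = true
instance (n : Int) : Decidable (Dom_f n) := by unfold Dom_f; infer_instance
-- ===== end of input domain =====

-- B sorts the characters of str(n) and scans the sorted list run by run (equal characters
-- are adjacent after sorting), instead of A's ten separate counting rescans of str(n).

-- ===== PORT A =====
-- 'int(i)' for a digit character i is ported as i.toNat - 48 (exact: i ranges over "1234567890").
def f (n : Int) : Int :=
  let dig := (PySem.Int.toStr n).toList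
  ("1234567890".toList).foldl (fun total i =>
    let count : Int := dig.foldl (fun c j => if i == j then c + 1 else c) 0
    if count > 1 then total + ((i.toNat : Int) - 48) * count else total) 0

-- ===== PORT B =====
-- B's run scan: the while loop counting the leading run is the length of the matching
-- takeWhile prefix, and s[k:] is the corresponding dropWhile suffix; 'int(a)' for the
-- digit character a (guarded by a.isdigit()) is ported as a.toNat - 48 (exact).
def scanRuns (s : List Char) : Int :=
  match s with
  | [] => 0
  | a :: rest =>
    let k : Int := ((rest.takeWhile (fun c => c == a)).length : Int) + 1
    (if k > 1 ∧ PySem.Chars.isdigit a then ((a.toNat : Int) - 48) * k else 0)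
      + scanRuns (rest.dropWhile (fun c => c == a))
termination_by s.length
decreasing_by
  simp only [List.length_cons]
  exact Nat.lt_succ_of_le (List.length_dropWhile_le _ _)

def f_alt (n : Int) : Int :=
  scanRuns (PySem.List.sorted ((PySem.Int.toStr n).toList) (fun c => c) false)

-- ===== PRECONDITION & SPEC =====
def Spec_f (n : Int) (out : Int) : Prop := out = f_alt n
instance (n : Int) (out : Int) : Decidable (Spec_f n out) := by unfold Spec_f; infer_instance

-- ===== CLAIM (what is proved, stated in full; the proofs are below) =====
def Claim_equal_f : Prop := ∀ (n : Int), Dom_f n → Spec_f n (f n)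

-- ===== LEMMAS AND PROOFS =====

-- the per-character contribution both programs add for a character x occurring c times
def gcnt (x : Char) (c : Nat) : Int :=
  if 1 < c ∧ PySem.Chars.isdigit x then ((x.toNat : Int) - 48) * (c : Int) else 0

theorem char_eq_of_toNat (x y : Char) (h : x.toNat = y.toNat) : x = y := by
  apply Char.ext
  have := congrArg UInt32.ofNat h
  rwa [Char.ofNat_toNat_eq_val, Char.ofNat_toNat_eq_val] at this

theorem digits_lit : "1234567890".toList = ['1','2','3','4','5','6','7','8','9','0'] := by
  decide

theorem mem_digits_of_isdigit (x : Char) (h : PySem.Chars.isdigit x = true) :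
    x ∈ ("1234567890".toList) := by
  have hb : '0' ≤ x ∧ x ≤ '9' := by simpa [PySem.Chars.isdigit] using h
  have b1 : 48 ≤ x.toNat := by
    simpa [Char.le_def, UInt32.le_iff_toNat_le] using hb.1
  have b2 : x.toNat ≤ 57 := by
    simpa [Char.le_def, UInt32.le_iff_toNat_le] using hb.2
  rw [digits_lit]
  have hinj : Function.Injective Char.toNat := fun a b hab => char_eq_of_toNat a b hab
  rw [← List.mem_map_of_injective hinj]
  show x.toNat ∈ ([49,50,51,52,53,54,55,56,57,48] : List Nat)
  simp only [List.mem_cons, List.not_mem_nil, or_false]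
  omega

-- A's inner loop compares 'i == j' with the scanned element second; flip to cite foldl_beq_add_one.
theorem foldl_beq_add_one' (l : List Char) (v : Char) (a : Int) :
    l.foldl (fun c j => if v == j then c + 1 else c) a = a + (l.count v : Int) := by
  have h : (fun (c : Int) j => if v == j then c + 1 else c)
      = (fun (c : Int) j => if j == v then c + 1 else c) := by
    funext c j; rw [Bool.beq_comm]
  rw [h, PySem.List.foldl_beq_add_one]

-- the run scan of a chain-sorted list sums gcnt over its distinct characters
theorem scanRuns_eq (s : List Char) (hs : s.Pairwise (· ≤ ·)) :
    scanRuns s = ∑ x ∈ s.toFinset, gcnt x (s.count x) := by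
  induction s using scanRuns.induct with
  | case1 => simp [scanRuns]
  | case2 a rest ih =>
    simp only [scanRuns]
    set t := rest.takeWhile (fun c => c == a) with ht
    set d := rest.dropWhile (fun c => c == a) with hd
    have hrest : rest.Pairwise (· ≤ ·) := (List.pairwise_cons.mp hs).2
    have hge : ∀ x ∈ rest, a ≤ x := (List.pairwise_cons.mp hs).1
    have hdp : d.Pairwise (· ≤ ·) := hrest.sublist (List.dropWhile_sublist _)
    have hta : ∀ c ∈ t, c = a := by
      intro c hc
      have hc' : c ∈ rest.takeWhile (fun c => c == a) := ht ▸ hc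
      exact eq_of_beq (List.mem_takeWhile_imp (p := fun c => c == a) hc')
    have hand : a ∉ d := by
      intro hmem
      cases hdd : d with
      | nil => rw [hdd] at hmem; exact (List.not_mem_nil).elim hmem
      | cons b d' =>
        have h0 := List.head?_dropWhile_not (fun c => c == a) rest
        rw [← hd, hdd] at h0
        simp only [List.head?_cons] at h0
        have hbne : b ≠ a := by simpa using h0
        rw [hdd] at hmem
        rcases List.mem_cons.mp hmem with h1 | h1
        · exact hbne h1.symm
        · -- a is in the tail of d, whose head b satisfies b ≤ a; but b ∈ rest gives a ≤ b
          have hba : b ≤ a := (List.pairwise_cons.mp (hdd ▸ hdp)).1 a h1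
          have hbr : b ∈ rest := (List.dropWhile_sublist _).mem (by rw [← hd, hdd]; exact List.mem_cons_self)
          exact hbne (le_antisymm hba (hge b hbr))
    have hsplit : rest = t ++ d := (List.takeWhile_append_dropWhile (p := fun c => c == a)).symm
    have hcount_a : (a :: rest).count a = t.length + 1 := by
      rw [List.count_cons_self, hsplit, List.count_append]
      have h1 : t.count a = t.length := List.count_eq_length.mpr (fun b hb => ((hta b hb).symm : a = b))
      have h2 : d.count a = 0 := List.count_eq_zero.mpr hand
      omega
    have hcount_ne : ∀ x, x ≠ a → (a :: rest).count x = d.count x := by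
      intro x hx
      rw [List.count_cons_of_ne (Ne.symm hx), hsplit, List.count_append,
        List.count_eq_zero.mpr (fun hm => hx (hta x hm)), Nat.zero_add]
    have hnotin : a ∉ d.toFinset := fun h => hand (List.mem_toFinset.mp h)
    have hfin : (a :: rest).toFinset = insert a d.toFinset := by
      ext x
      simp only [List.mem_toFinset, List.mem_cons, Finset.mem_insert, hsplit, List.mem_append]
      constructor
      · rintro (h | h | h)
        · exact Or.inl h
        · exact Or.inl (hta x h)
        · exact Or.inr h
      · rintro (h | h)
        · exact Or.inl h
        · exact Or.inr (Or.inr h)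
    rw [hfin, Finset.sum_insert hnotin]
    have hsum : ∑ x ∈ d.toFinset, gcnt x ((a :: rest).count x)
        = ∑ x ∈ d.toFinset, gcnt x (d.count x) := by
      apply Finset.sum_congr rfl
      intro x hx
      rw [hcount_ne x (fun h => hnotin (h ▸ hx))]
    rw [hsum, ← ih hdp]
    congr 1
    simp only [gcnt, hcount_a]
    by_cases hdig : PySem.Chars.isdigit a = true
    · simp only [hdig, and_true, gt_iff_lt]
      split_ifs with h1 h2 h2
      · push_cast; ring
      · exact absurd (by exact_mod_cast h1) h2
      · exact absurd (by exact_mod_cast h2) h1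
      · rfl
    · simp [hdig]

theorem f_spec : Claim_equal_f := by
  intro n _
  unfold Spec_f f f_alt
  simp only []
  set dig := (PySem.Int.toStr n).toList with hdig
  -- A side: each of the ten rescans is a count; the fold is a sum of gcnt
  have hA :
      ("1234567890".toList).foldl (fun total i =>
        let count : Int := dig.foldl (fun c j => if i == j then c + 1 else c) 0
        if count > 1 then total + ((i.toNat : Int) - 48) * count else total) 0
      = ∑ x ∈ ("1234567890".toList).toFinset, gcnt x (dig.count x) := by
    have hcongr : ∀ (acc : Int), ∀ i ∈ ("1234567890".toList),
        (let count : Int := dig.foldl (fun c j => if i == j then c + 1 else c) 0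
         if count > 1 then acc + ((i.toNat : Int) - 48) * count else acc)
        = acc + gcnt i (dig.count i) := by
      intro acc i hi
      have hdigi : PySem.Chars.isdigit i = true := by
        rw [digits_lit] at hi; fin_cases hi <;> decide
      simp only [foldl_beq_add_one', zero_add, gcnt, hdigi, and_true, gt_iff_lt]
      split_ifs with h1 h2 h2
      · ring
      · exact absurd (by exact_mod_cast h1) h2
      · exact absurd (by exact_mod_cast h2) h1
      · omega
    rw [PySem.List.foldl_congr_mem _ _ _ _ hcongr,
      PySem.List.foldl_add _ (fun i => gcnt i (dig.count i)) 0,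
      List.sum_toFinset _ (by rw [digits_lit]; decide)]
    simp
  rw [hA]
  -- B side: the run scan of the sorted copy sums gcnt over the distinct characters of dig
  set S := PySem.List.sorted dig (fun c => c) false with hS
  have hperm : S.Perm dig := PySem.List.sorted_perm dig _ _
  have hB : scanRuns S = ∑ x ∈ dig.toFinset, gcnt x (dig.count x) := by
    rw [scanRuns_eq S (PySem.List.sorted_pairwise dig (fun c => c))]
    rw [List.toFinset_eq_of_perm _ _ hperm]
    exact Finset.sum_congr rfl (fun x _ => by rw [hperm.count_eq])
  rw [hB]
  -- both sums extend by zero terms to the union of the two index sets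
  have h1 : ∑ x ∈ ("1234567890".toList).toFinset, gcnt x (dig.count x)
      = ∑ x ∈ ("1234567890".toList).toFinset ∪ dig.toFinset, gcnt x (dig.count x) := by
    apply Finset.sum_subset Finset.subset_union_left
    intro x _ hx
    have hnd : PySem.Chars.isdigit x ≠ true := fun hd =>
      hx (List.mem_toFinset.mpr (mem_digits_of_isdigit x hd))
    simp [gcnt, hnd]
  have h2 : ∑ x ∈ dig.toFinset, gcnt x (dig.count x)
      = ∑ x ∈ ("1234567890".toList).toFinset ∪ dig.toFinset, gcnt x (dig.count x) := by
    apply Finset.sum_subset Finset.subset_union_right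
    intro x _ hx
    have hc : dig.count x = 0 :=
      List.count_eq_zero.mpr (fun hm => hx (List.mem_toFinset.mpr hm))
    simp [gcnt, hc]
  rw [h1, h2]
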